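-- pv_equiv track=rewrite | github.com/Heimdall-SBOM/heimdall | scripts/validate_sboms_online.py | validate_spdx_structure
-- ===== SOURCE A (Python) =====
-- from typing import Dict, List, Optional, Tuple
--
-- def validate_spdx_structure(spdx_content: str) -> Tuple[bool, List[str]]:
--     """
--     Validate SPDX structure and required fields.
--     """
--     errors = []
--     lines = spdx_content.split('\n')
--
--     # Check for required header fields
--     required_fields = ['SPDXVersion', 'DataLicense', 'DocumentName', 'DocumentNamespace']
--     found_fields = set()
--
--     for line in lines:
--         line = line.strip()
--         if ':' in line:
--             field = line.split(':', 1)[0].strip()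
--             found_fields.add(field)
--
--     for field in required_fields:
--         if field not in found_fields:
--             errors.append(f"Missing required SPDX field: {field}")
--
--     # Check SPDX version
--     for line in lines:
--         if line.startswith('SPDXVersion:'):
--             version = line.split(':', 1)[1].strip()
--             if not version.startswith('SPDX-'):
--                 errors.append(f"Invalid SPDX version format: {version}")
--             break
--
--     # Check for package or file information (both are valid SPDX formats)
--     has_packages = any('PackageName:' in line for line in lines)
--     has_files = any('FileName:' in line for line in lines)
--     if not has_packages and not has_files:
--         errors.append("No package or file information found")
--
--     return len(errors) == 0, errors
-- ===== SOURCE B (Python) =====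
-- def validate_spdx_structure(spdx_content):
--     # One pass over the lines with per-field booleans instead of four separate scans and a set.
--     f_ver = f_lic = f_name = f_ns = False
--     version = None
--     has_info = False
--     for line in spdx_content.split('\n'):
--         stripped = line.strip()
--         if ':' in stripped:
--             field = stripped.split(':', 1)[0].strip()
--             f_ver = f_ver or field == 'SPDXVersion'
--             f_lic = f_lic or field == 'DataLicense'
--             f_name = f_name or field == 'DocumentName'
--             f_ns = f_ns or field == 'DocumentNamespace'
--         if version is None and line.startswith('SPDXVersion:'):
--             version = line.split(':', 1)[1].strip()
--         has_info = has_info or 'PackageName:' in line or 'FileName:' in line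
--     errors = (
--         ([] if f_ver else ['Missing required SPDX field: SPDXVersion'])
--         + ([] if f_lic else ['Missing required SPDX field: DataLicense'])
--         + ([] if f_name else ['Missing required SPDX field: DocumentName'])
--         + ([] if f_ns else ['Missing required SPDX field: DocumentNamespace'])
--         + ([] if version is None or version.startswith('SPDX-')
--            else ['Invalid SPDX version format: ' + version])
--         + ([] if has_info else ['No package or file information found'])
--     )
--     return len(errors) == 0, errors
-- ===== Notes on version B (the rewrite author's own statement) =====
-- stated objective: alternative
-- what changed: A scans the lines four separate times (building a set of field-name prefixes, a second loop for the SPDX version, and two any() scans for package/file info); B makes one pass over the lines maintaining four per-field booleans, the first captured SPDXVersion value and a single has-info flag, then assembles the errors in the same order.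
import Mathlib
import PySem

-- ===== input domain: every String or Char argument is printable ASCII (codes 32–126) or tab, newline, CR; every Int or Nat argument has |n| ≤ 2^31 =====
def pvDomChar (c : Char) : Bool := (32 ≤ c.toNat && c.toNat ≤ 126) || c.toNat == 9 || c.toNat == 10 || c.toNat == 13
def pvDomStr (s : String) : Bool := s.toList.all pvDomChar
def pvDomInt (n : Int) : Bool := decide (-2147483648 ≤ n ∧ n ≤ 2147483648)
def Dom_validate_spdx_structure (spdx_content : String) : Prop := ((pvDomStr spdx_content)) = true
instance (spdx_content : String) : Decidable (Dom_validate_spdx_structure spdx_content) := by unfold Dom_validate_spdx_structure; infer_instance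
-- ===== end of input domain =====

-- B replaces A's four separate scans over the lines (a found-fields set plus three more passes)
-- by a single pass keeping per-field booleans, the first SPDXVersion value and one has-info flag (objective: alternative).

-- ===== PORT A =====
-- A's 'for line in lines: if line.startswith('SPDXVersion:'): …; break' loop
def pvVersionErrorsA : List String → List String
  | [] => []
  | line :: rest =>
    if PySem.Str.startswith line "SPDXVersion:" then
      let version := PySem.Str.strip (((PySem.Str.splitMax? line ":" 1).getD []).getD 1 "")
      if !(PySem.Str.startswith version "SPDX-") then
        ["Invalid SPDX version format: " ++ version]
      else []
    else pvVersionErrorsA rest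

def validate_spdx_structure (spdx_content : String) : Bool × List String :=
  let lines := (PySem.Str.split? spdx_content "\n").getD []
  let required_fields := ["SPDXVersion", "DataLicense", "DocumentName", "DocumentNamespace"]
  let found_fields : PySem.Set String :=
    lines.foldl (fun fs line =>
      let line := PySem.Str.strip line
      if PySem.Str.isIn ":" line then
        PySem.Set.add fs (PySem.Str.strip (((PySem.Str.splitMax? line ":" 1).getD []).getD 0 ""))
      else fs) PySem.Set.empty
  let errors := required_fields.foldl (fun es field =>
      if PySem.Set.contains found_fields field then es
      else es ++ ["Missing required SPDX field: " ++ field]) []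
  let errors := errors ++ pvVersionErrorsA lines
  let has_packages := lines.any (fun line => PySem.Str.isIn "PackageName:" line)
  let has_files := lines.any (fun line => PySem.Str.isIn "FileName:" line)
  let errors := if !has_packages && !has_files then
      errors ++ ["No package or file information found"] else errors
  (errors.length == 0, errors)

-- ===== PORT B =====
-- the body of B's single loop over the lines
def pvBStep (st : Bool × Bool × Bool × Bool × Option String × Bool) (line : String) :
    Bool × Bool × Bool × Bool × Option String × Bool :=
  let (f_ver, f_lic, f_name, f_ns, version, has_info) := st
  let stripped := PySem.Str.strip line
  let (f_ver, f_lic, f_name, f_ns) :=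
    if PySem.Str.isIn ":" stripped then
      let field := PySem.Str.strip (((PySem.Str.splitMax? stripped ":" 1).getD []).getD 0 "")
      (f_ver || field == "SPDXVersion", f_lic || field == "DataLicense",
       f_name || field == "DocumentName", f_ns || field == "DocumentNamespace")
    else (f_ver, f_lic, f_name, f_ns)
  let version := if version.isNone && PySem.Str.startswith line "SPDXVersion:" then
      some (PySem.Str.strip (((PySem.Str.splitMax? line ":" 1).getD []).getD 1 ""))
    else version
  let has_info := has_info || PySem.Str.isIn "PackageName:" line || PySem.Str.isIn "FileName:" line
  (f_ver, f_lic, f_name, f_ns, version, has_info)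

def validate_spdx_structure_alt (spdx_content : String) : Bool × List String :=
  let st := ((PySem.Str.split? spdx_content "\n").getD []).foldl pvBStep
      (false, false, false, false, none, false)
  let (f_ver, f_lic, f_name, f_ns, version, has_info) := st
  let errors :=
    (if f_ver then [] else ["Missing required SPDX field: SPDXVersion"]) ++
    (if f_lic then [] else ["Missing required SPDX field: DataLicense"]) ++
    (if f_name then [] else ["Missing required SPDX field: DocumentName"]) ++
    (if f_ns then [] else ["Missing required SPDX field: DocumentNamespace"]) ++
    (match version with
     | some v => if !(PySem.Str.startswith v "SPDX-") then ["Invalid SPDX version format: " ++ v] else []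
     | none => []) ++
    (if has_info then [] else ["No package or file information found"])
  (errors.length == 0, errors)

-- ===== PRECONDITION & SPEC =====
def Spec_validate_spdx_structure (spdx_content : String) (out : Bool × List String) : Prop := out = validate_spdx_structure_alt spdx_content
instance (spdx_content : String) (out : Bool × List String) : Decidable (Spec_validate_spdx_structure spdx_content out) := by unfold Spec_validate_spdx_structure; infer_instance

-- ===== CLAIM (what is proved, stated in full; the proofs are below) =====
def Claim_equal_validate_spdx_structure : Prop := ∀ (spdx_content : String), Dom_validate_spdx_structure spdx_content → Spec_validate_spdx_structure spdx_content (validate_spdx_structure spdx_content)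

-- ===== LEMMAS AND PROOFS =====

-- per-line conditions/values both programs compute, as named abbreviations for the proofs
def pvHasC (line : String) : Bool := PySem.Str.isIn ":" (PySem.Str.strip line)
def pvField (line : String) : String :=
  PySem.Str.strip (((PySem.Str.splitMax? (PySem.Str.strip line) ":" 1).getD []).getD 0 "")
def pvExtract (line : String) : String :=
  PySem.Str.strip (((PySem.Str.splitMax? line ":" 1).getD []).getD 1 "")
-- the version captured from the first 'SPDXVersion:' line, if any
def pvVerOf (lines : List String) : Option String :=
  match lines.find? (fun l => PySem.Str.startswith l "SPDXVersion:") with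
  | some l => some (pvExtract l)
  | none => none

theorem pv_contains_add (s : PySem.Set String) (x f : String) :
    PySem.Set.contains (s.add x) f = (PySem.Set.contains s f || (x == f)) := by
  rw [Bool.eq_iff_iff]
  simp only [PySem.Set.contains_iff, Bool.or_eq_true, beq_iff_eq, PySem.Set.mem_add]
  tauto

theorem pv_contains_empty (f : String) : PySem.Set.contains PySem.Set.empty f = false := rfl

-- membership in A's found_fields set is 'some line yields this field'
theorem pv_contains_foldl (lines : List String) (s0 : PySem.Set String) (f : String) :
    PySem.Set.contains
      (lines.foldl (fun fs line =>
        let line := PySem.Str.strip line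
        if PySem.Str.isIn ":" line then
          PySem.Set.add fs (PySem.Str.strip (((PySem.Str.splitMax? line ":" 1).getD []).getD 0 ""))
        else fs) s0) f
    = (PySem.Set.contains s0 f || lines.any (fun x => pvHasC x && (pvField x == f))) := by
  induction lines generalizing s0 with
  | nil => simp
  | cons hd tl ih =>
    simp only [List.foldl_cons, List.any_cons]
    rw [ih]
    by_cases h : PySem.Str.isIn ":" (PySem.Str.strip hd) = true
    · rw [if_pos h, pv_contains_add]
      simp only [pvHasC, pvField, h, Bool.true_and, Bool.or_assoc]
    · rw [if_neg h]
      simp only [pvHasC, pvField, Bool.eq_false_iff.mpr h, Bool.false_and, Bool.false_or]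

-- A's break-loop returns the error determined by the first 'SPDXVersion:' line
theorem pv_verErrsA_eq (lines : List String) :
    pvVersionErrorsA lines =
      (match pvVerOf lines with
       | some v => if !(PySem.Str.startswith v "SPDX-") then ["Invalid SPDX version format: " ++ v] else []
       | none => []) := by
  induction lines with
  | nil => rfl
  | cons hd tl ih =>
    by_cases h : PySem.Str.startswith hd "SPDXVersion:" = true
    · simp only [pvVersionErrorsA]
      rw [if_pos h]
      unfold pvVerOf
      rw [List.find?_cons, h]
      rfl
    · simp only [pvVersionErrorsA]
      rw [if_neg h, ih]
      unfold pvVerOf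
      rw [List.find?_cons, Bool.eq_false_iff.mpr h]

theorem pv_any_or (lines : List String) (p q : String → Bool) :
    lines.any (fun x => p x || q x) = (lines.any p || lines.any q) := by
  induction lines with
  | nil => rfl
  | cons hd tl ih =>
    simp only [List.any_cons, ih]
    cases p hd <;> cases q hd <;> simp

theorem pvVerOf_cons (hd : String) (tl : List String) :
    pvVerOf (hd :: tl) =
      (if PySem.Str.startswith hd "SPDXVersion:" then some (pvExtract hd) else pvVerOf tl) := by
  unfold pvVerOf
  rw [List.find?_cons]
  cases PySem.Str.startswith hd "SPDXVersion:" <;> simp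

-- closed form of B's single-pass fold
theorem pv_bfold (lines : List String) (v l n ns : Bool) (ver : Option String) (hi : Bool) :
    lines.foldl pvBStep (v, l, n, ns, ver, hi) =
      (v || lines.any (fun x => pvHasC x && (pvField x == "SPDXVersion")),
       l || lines.any (fun x => pvHasC x && (pvField x == "DataLicense")),
       n || lines.any (fun x => pvHasC x && (pvField x == "DocumentName")),
       ns || lines.any (fun x => pvHasC x && (pvField x == "DocumentNamespace")),
       (match ver with | some x => some x | none => pvVerOf lines),
       hi || lines.any (fun x => PySem.Str.isIn "PackageName:" x || PySem.Str.isIn "FileName:" x)) := by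
  induction lines generalizing v l n ns ver hi with
  | nil => cases ver <;> simp [pvVerOf]
  | cons hd tl ih =>
    simp only [List.foldl_cons, List.any_cons]
    rw [pvVerOf_cons]
    by_cases h : PySem.Str.isIn ":" (PySem.Str.strip hd) = true
    · have h2 : pvHasC hd = true := by simp only [pvHasC]; exact h
      simp only [pvBStep, if_pos h]
      rw [ih]; clear ih
      cases ver <;> cases hsw : PySem.Str.startswith hd "SPDXVersion:" <;>
        simp [pvField, pvExtract, h2, Bool.or_assoc]
    · have h2 : pvHasC hd = false := by simp only [pvHasC]; exact Bool.eq_false_iff.mpr h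
      simp only [pvBStep, if_neg h]
      rw [ih]; clear ih
      cases ver <;> cases hsw : PySem.Str.startswith hd "SPDXVersion:" <;>
        simp [pvExtract, h2, Bool.or_assoc]

theorem pv_main (s : String) : validate_spdx_structure s = validate_spdx_structure_alt s := by
  unfold validate_spdx_structure validate_spdx_structure_alt
  rw [pv_bfold]
  simp only [pv_contains_foldl, pv_contains_empty, Bool.false_or, pv_verErrsA_eq,
    List.foldl_cons, List.foldl_nil, List.nil_append]
  rw [pv_any_or]
  generalize ((PySem.Str.split? s "\n").getD []).any
      (fun x => pvHasC x && (pvField x == "SPDXVersion")) = c1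
  generalize ((PySem.Str.split? s "\n").getD []).any
      (fun x => pvHasC x && (pvField x == "DataLicense")) = c2
  generalize ((PySem.Str.split? s "\n").getD []).any
      (fun x => pvHasC x && (pvField x == "DocumentName")) = c3
  generalize ((PySem.Str.split? s "\n").getD []).any
      (fun x => pvHasC x && (pvField x == "DocumentNamespace")) = c4
  generalize ((PySem.Str.split? s "\n").getD []).any
      (fun x => PySem.Str.isIn "PackageName:" x) = hp
  generalize ((PySem.Str.split? s "\n").getD []).any
      (fun x => PySem.Str.isIn "FileName:" x) = hf
  generalize pvVerOf ((PySem.Str.split? s "\n").getD []) = ver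
  cases ver <;> cases c1 <;> cases c2 <;> cases c3 <;> cases c4 <;> cases hp <;> cases hf <;>
    simp

-- ===== VERDICT (by name: the statement is the Claim_ definition above) =====
theorem validate_spdx_structure_spec : Claim_equal_validate_spdx_structure := by
  intro s _
  unfold Spec_validate_spdx_structure
  exact pv_main s
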